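-- pv_equiv track=rewrite | github.com/yepher/livekit_radio | icecast_stream.py | _parse_icy_metadata
-- ===== SOURCE A (Python) =====
-- def _parse_icy_metadata(data):
--     # Example: "StreamTitle='LATINO ';StreamUrl='';"
--     metadata = {}
--     parts = data.split(';')
--     for part in parts:
--         if '=' in part:
--             key, val = part.split('=', 1)
--             metadata[key.strip()] = val.strip("' ")
--     return metadata
-- ===== SOURCE B (Python) =====
-- def _parse_icy_metadata(data):
--     # Single-pass character state machine: accumulate key until the first '=',
--     # then value until ';'; finalize a field only if an '=' was seen.
--     metadata = {}
--     key, val, in_val = [], [], False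
--     for ch in data:
--         if ch == ';':
--             if in_val:
--                 metadata[''.join(key).strip()] = ''.join(val).strip("' ")
--             key, val, in_val = [], [], False
--         elif ch == '=' and not in_val:
--             in_val = True
--         elif in_val:
--             val.append(ch)
--         else:
--             key.append(ch)
--     if in_val:
--         metadata[''.join(key).strip()] = ''.join(val).strip("' ")
--     return metadata
-- ===== Notes on version B (the rewrite author's own statement) =====
-- stated objective: alternative
-- what changed: Replaces split(';') plus per-part split('=',1) with a single-pass character state machine that accumulates the key until the first '=' and the value until ';', finalizing a field only when an '=' was seen.
import Mathlib
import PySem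

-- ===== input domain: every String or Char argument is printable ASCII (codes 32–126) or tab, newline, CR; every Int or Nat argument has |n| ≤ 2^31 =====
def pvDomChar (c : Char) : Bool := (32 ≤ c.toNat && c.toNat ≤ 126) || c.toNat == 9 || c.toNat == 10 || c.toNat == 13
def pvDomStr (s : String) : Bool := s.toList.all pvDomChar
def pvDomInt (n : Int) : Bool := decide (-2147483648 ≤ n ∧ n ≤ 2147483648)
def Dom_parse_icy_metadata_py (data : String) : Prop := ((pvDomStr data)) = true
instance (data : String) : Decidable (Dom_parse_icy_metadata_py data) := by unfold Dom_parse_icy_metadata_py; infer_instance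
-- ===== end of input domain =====

-- B replaces A's split(';') + per-part split('=',1) with a single-pass character state machine (alternative decomposition, same cost); proved equal on all inputs.

-- ===== PORT A =====
-- the body of A's for-loop: process one ';'-separated part into the dict
def pvStepA (d : PySem.Dict String String) (part : List Char) : PySem.Dict String String :=
  if PySem.Chars.isIn ['='] part then
    match PySem.Chars.splitOnMax part ['='] 1 with
    | [key, val] =>
        d.insert (String.ofList (PySem.Chars.strip key)) (String.ofList (PySem.Chars.stripChars val ['\'', ' ']))
    | _ => d  -- unreachable: split('=', 1) on a part containing '=' yields exactly two pieces
  else d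

def parse_icy_metadata_py (data : String) : List (String × String) :=
  ((PySem.Chars.splitOn data.toList [';']).foldl pvStepA PySem.Dict.empty).items

-- ===== PORT B =====
-- finalize the current field: insert only if an '=' was seen
def pvFinalize (d : PySem.Dict String String) (key val : List Char) (inVal : Bool) : PySem.Dict String String :=
  if inVal then
    d.insert (String.ofList (PySem.Chars.strip key)) (String.ofList (PySem.Chars.stripChars val ['\'', ' ']))
  else d

-- the character loop of B
def pvScan : List Char → PySem.Dict String String → List Char → List Char → Bool → PySem.Dict String String
  | [], d, key, val, inVal => pvFinalize d key val inVal
  | ch :: cs, d, key, val, inVal =>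
    if ch = ';' then pvScan cs (pvFinalize d key val inVal) [] [] false
    else if ch = '=' ∧ ¬ inVal then pvScan cs d key val true
    else if inVal then pvScan cs d key (val ++ [ch]) inVal
    else pvScan cs d (key ++ [ch]) val inVal

def parse_icy_metadata_py_alt (data : String) : List (String × String) :=
  (pvScan data.toList PySem.Dict.empty [] [] false).items

-- ===== PRECONDITION & SPEC =====
def Spec_parse_icy_metadata_py (data : String) (out : List (String × String)) : Prop := out = parse_icy_metadata_py_alt data
instance (data : String) (out : List (String × String)) : Decidable (Spec_parse_icy_metadata_py data out) := by unfold Spec_parse_icy_metadata_py; infer_instance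

-- ===== CLAIM (what is proved, stated in full; the proofs are below) =====
def Claim_equal_parse_icy_metadata_py : Prop := ∀ (data : String), Dom_parse_icy_metadata_py data → Spec_parse_icy_metadata_py data (parse_icy_metadata_py data)

-- ===== LEMMAS AND PROOFS =====

-- reference splitter: Python's s.split(c) for a single-character separator
def pvSplit (c : Char) : List Char → List (List Char)
  | [] => [[]]
  | d :: rest =>
    if d = c then [] :: pvSplit c rest
    else
      match pvSplit c rest with
      | p :: ps => (d :: p) :: ps
      | [] => [[d]]

theorem pvSplit_ne_nil (c : Char) (l : List Char) : pvSplit c l ≠ [] := by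
  cases l with
  | nil => simp [pvSplit]
  | cons d rest =>
    simp only [pvSplit]
    split
    · simp
    · split <;> simp_all

theorem splitOn_go_eq (c : Char) :
    ∀ (l : List Char) (fuel : Nat), l.length < fuel → ∀ (cur : List Char) (acc : List (List Char)),
      PySem.Chars.splitOn.go [c] fuel l cur acc =
        acc.reverse ++ (match pvSplit c l with
                        | p :: ps => (cur.reverse ++ p) :: ps
                        | [] => []) := by
  intro l
  induction l with
  | nil =>
    intro fuel hf cur acc
    cases fuel with
    | zero => omega
    | succ f => simp [PySem.Chars.splitOn.go, pvSplit]
  | cons d rest ih =>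
    intro fuel hf cur acc
    cases fuel with
    | zero => omega
    | succ f =>
      have hfr : rest.length < f := by simpa using hf
      by_cases hd : d = c
      · subst hd
        have hpre : [d].isPrefixOf (d :: rest) = true := by simp [List.isPrefixOf]
        rw [PySem.Chars.splitOn.go]
        simp only [hpre, if_true, List.length_cons, List.length_nil, List.drop_succ_cons, List.drop_zero]
        rw [ih f hfr [] (cur.reverse :: acc)]
        obtain ⟨p, ps, hms⟩ : ∃ p ps, pvSplit d rest = p :: ps := by
          cases h : pvSplit d rest with
          | nil => exact absurd h (pvSplit_ne_nil d rest)
          | cons p ps => exact ⟨p, ps, rfl⟩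
        simp [pvSplit, hms]
      · have hpre : [c].isPrefixOf (d :: rest) = false := by
          simp [List.isPrefixOf]
          exact fun h => hd h.symm
        rw [PySem.Chars.splitOn.go]
        simp only [hpre, Bool.false_eq_true, if_false]
        rw [ih f hfr (d :: cur) acc]
        obtain ⟨p, ps, hms⟩ : ∃ p ps, pvSplit c rest = p :: ps := by
          cases h : pvSplit c rest with
          | nil => exact absurd h (pvSplit_ne_nil c rest)
          | cons p ps => exact ⟨p, ps, rfl⟩
        simp [pvSplit, hms, hd]

theorem splitOn_eq_pvSplit (c : Char) (l : List Char) :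
    PySem.Chars.splitOn l [c] = pvSplit c l := by
  unfold PySem.Chars.splitOn
  rw [splitOn_go_eq c l (l.length + 1) (by omega) [] []]
  obtain ⟨p, ps, hms⟩ : ∃ p ps, pvSplit c l = p :: ps := by
    cases h : pvSplit c l with
    | nil => exact absurd h (pvSplit_ne_nil c l)
    | cons p ps => exact ⟨p, ps, rfl⟩
  simp [hms]

theorem splitOnMax_go_zero (c : Char) :
    ∀ (l : List Char) (fuel : Nat) (cur : List Char) (acc : List (List Char)),
      PySem.Chars.splitOnMax.go [c] fuel 0 l cur acc = acc.reverse ++ [cur.reverse ++ l] := by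
  intro l fuel cur acc
  cases fuel with
  | zero => simp [PySem.Chars.splitOnMax.go]
  | succ f => cases l <;> simp [PySem.Chars.splitOnMax.go]

theorem splitOnMax_go_one_sep (c : Char) :
    ∀ (key : List Char), c ∉ key → ∀ (val : List Char) (fuel : Nat),
      (key ++ c :: val).length < fuel → ∀ (cur : List Char) (acc : List (List Char)),
      PySem.Chars.splitOnMax.go [c] fuel 1 (key ++ c :: val) cur acc =
        acc.reverse ++ [cur.reverse ++ key, val] := by
  intro key
  induction key with
  | nil =>
    intro _ val fuel hf cur acc
    cases fuel with
    | zero => simp at hf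
    | succ f =>
      have hpre : [c].isPrefixOf (c :: val) = true := by simp [List.isPrefixOf]
      rw [List.nil_append, PySem.Chars.splitOnMax.go]
      simp only [hpre, if_true]
      norm_num
      rw [splitOnMax_go_zero]
      simp
  | cons d rest ih =>
    intro hmem val fuel hf cur acc
    have hd : d ≠ c := by intro h; exact hmem (by simp [h])
    have hrest : c ∉ rest := fun h => hmem (List.mem_cons_of_mem _ h)
    cases fuel with
    | zero => simp at hf
    | succ f =>
      have hpre : [c].isPrefixOf (d :: (rest ++ c :: val)) = false := by
        simp [List.isPrefixOf]
        exact fun h => hd h.symm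
      rw [List.cons_append, PySem.Chars.splitOnMax.go]
      simp only [hpre, Bool.false_eq_true, if_false, if_neg (one_ne_zero)]
      rw [ih hrest val f (by simp at hf ⊢; omega) (d :: cur) acc]
      simp

theorem splitOnMax1_sep (c : Char) (key val : List Char) (h : c ∉ key) :
    PySem.Chars.splitOnMax (key ++ c :: val) [c] 1 = [key, val] := by
  unfold PySem.Chars.splitOnMax
  rw [if_neg (by norm_num)]
  have : ((1 : Int)).toNat = 1 := rfl
  rw [this, splitOnMax_go_one_sep c key h val ((key ++ c :: val).length + 1) (by omega) [] []]
  simp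

theorem isIn_singleton (c : Char) (l : List Char) : PySem.Chars.isIn [c] l = true ↔ c ∈ l := by
  rw [PySem.Chars.isIn_iff_infix]
  constructor
  · intro h
    exact h.subset (by simp)
  · intro h
    obtain ⟨s, t, rfl⟩ := List.append_of_mem h
    exact ⟨s, t, by simp⟩

theorem stepA_noEq (d : PySem.Dict String String) (part : List Char) (h : '=' ∉ part) :
    pvStepA d part = d := by
  have : PySem.Chars.isIn ['='] part = false := by
    rw [← Bool.not_eq_true, isIn_singleton]; exact h
  simp [pvStepA, this]

theorem stepA_eq (d : PySem.Dict String String) (key val : List Char) (hk : '=' ∉ key) :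
    pvStepA d (key ++ '=' :: val) =
      d.insert (String.ofList (PySem.Chars.strip key)) (String.ofList (PySem.Chars.stripChars val ['\'', ' '])) := by
  have hin : PySem.Chars.isIn ['='] (key ++ '=' :: val) = true := by
    rw [isIn_singleton]; simp
  simp only [pvStepA, hin, if_true, splitOnMax1_sep '=' key val hk]

theorem pvSplit_noSep (c : Char) (l : List Char) (h : c ∉ l) : pvSplit c l = [l] := by
  induction l with
  | nil => rfl
  | cons d rest ih =>
    have hd : d ≠ c := by intro he; exact h (by simp [he])
    have := ih (fun hm => h (List.mem_cons_of_mem _ hm))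
    simp [pvSplit, hd, this]

theorem pvSplit_sep (c : Char) (pfx rest : List Char) (h : c ∉ pfx) :
    pvSplit c (pfx ++ c :: rest) = pfx :: pvSplit c rest := by
  induction pfx with
  | nil => simp [pvSplit]
  | cons d p ih =>
    have hd : d ≠ c := by intro he; exact h (by simp [he])
    have hp := ih (fun hm => h (List.mem_cons_of_mem _ hm))
    rw [List.cons_append]
    simp only [pvSplit, if_neg hd, hp]

theorem scan_eq (cs : List Char) :
    ∀ (d : PySem.Dict String String) (key val : List Char) (inVal : Bool),
      ';' ∉ key → '=' ∉ key → ';' ∉ val → (inVal = false → val = []) →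
      pvScan cs d key val inVal =
        (pvSplit ';' ((key ++ (if inVal then '=' :: val else [])) ++ cs)).foldl pvStepA d := by
  induction cs with
  | nil =>
    intro d key val inVal hk1 hk2 hv hfv
    have hpfx : ';' ∉ key ++ (if inVal then '=' :: val else []) := by
      intro hm
      rcases List.mem_append.mp hm with h | h
      · exact hk1 h
      · cases inVal <;> simp_all
    rw [List.append_nil, pvSplit_noSep ';' _ hpfx]
    cases inVal with
    | true => simp [pvScan, pvFinalize, List.foldl, stepA_eq d key val hk2]
    | false =>
      simp [pvScan, pvFinalize, List.foldl, stepA_noEq d key hk2]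
  | cons ch cs ih =>
    intro d key val inVal hk1 hk2 hv hfv
    by_cases hsc : ch = ';'
    · subst hsc
      have hpfx : ';' ∉ key ++ (if inVal then '=' :: val else []) := by
        intro hm
        rcases List.mem_append.mp hm with h | h
        · exact hk1 h
        · cases inVal <;> simp_all
      rw [show (key ++ (if inVal then '=' :: val else [])) ++ ';' :: cs
            = (key ++ (if inVal then '=' :: val else [])) ++ (';' :: cs) from rfl,
          pvSplit_sep ';' _ cs hpfx]
      rw [List.foldl_cons]
      have hstep : pvStepA d (key ++ (if inVal then '=' :: val else [])) = pvFinalize d key val inVal := by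
        cases inVal with
        | true => simp [stepA_eq d key val hk2, pvFinalize]
        | false => simp [stepA_noEq d key hk2, pvFinalize]
      rw [hstep]
      have := ih (pvFinalize d key val inVal) [] [] false (by simp) (by simp) (by simp) (fun _ => rfl)
      simpa [pvScan] using this
    · by_cases heq : ch = '=' ∧ inVal = false
      · obtain ⟨rfl, rfl⟩ := heq
        have hval : val = [] := hfv rfl
        subst hval
        have := ih d key [] true hk1 hk2 (by simp) (by simp)
        rw [show pvScan ('=' :: cs) d key [] false = pvScan cs d key [] true by
              simp [pvScan]]
        rw [this]
        simp
      · cases inVal with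
        | true =>
          have := ih d key (val ++ [ch]) true hk1 hk2
            (by intro hm; rcases List.mem_append.mp hm with h | h
                · exact hv h
                · simp at h; exact hsc h.symm) (by simp)
          rw [show pvScan (ch :: cs) d key val true = pvScan cs d key (val ++ [ch]) true by
              simp [pvScan, hsc]]
          rw [this]
          simp
        | false =>
          have hne : ch ≠ '=' := fun h => heq ⟨h, rfl⟩
          have hval : val = [] := hfv rfl
          subst hval
          have := ih d (key ++ [ch]) [] false
            (by intro hm; rcases List.mem_append.mp hm with h | h
                · exact hk1 h
                · simp at h; exact hsc h.symm)
            (by intro hm; rcases List.mem_append.mp hm with h | h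
                · exact hk2 h
                · simp at h; exact hne h.symm)
            (by simp) (fun _ => rfl)
          rw [show pvScan (ch :: cs) d key [] false = pvScan cs d (key ++ [ch]) [] false by
              simp [pvScan, hsc, hne]]
          rw [this]
          simp

-- ===== VERDICT (by name: the statement is the Claim_ definition above) =====
theorem parse_icy_metadata_py_spec : Claim_equal_parse_icy_metadata_py := by
  intro data _
  unfold Spec_parse_icy_metadata_py parse_icy_metadata_py parse_icy_metadata_py_alt
  rw [splitOn_eq_pvSplit, scan_eq data.toList PySem.Dict.empty [] [] false
      (by simp) (by simp) (by simp) (fun _ => rfl)]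
  simp
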